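-- pv_equiv track=rewrite | github.com/JiayangZhou/algo-ds | algo/dp/kadane.py | largestVariance
-- ===== SOURCE A (Python) =====
-- def largestVariance(s: str) -> int:
--     allElements = set()
--     from collections import defaultdict
--     d = defaultdict(lambda: 0)
--     for _ in s:
--         if _ not in allElements:
--             allElements.add(_)
--         d[_] += 1
--     ans = 0
--     allElements = list(allElements)
--     for i in range(len(allElements)):
--         major = allElements[i]
--         for j in range(len(allElements)):
--             if i == j:
--                 continue
--             minor = allElements[j]
--             remainMinor = d[minor]
--             maxLocal = maxGlobal = 0
--             seen = set()
--             for _ in s: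
--                 if _ == major:
--                     maxLocal += 1
--                     seen.add(_)
--                 elif _ == minor:
--                     maxLocal -= 1
--                     seen.add(_)
--                     remainMinor -= 1
--                 else:
--                     continue
--                 if maxLocal < 0 and remainMinor > 0:
--                     maxLocal = 0
--                     seen = set()
--                 if len(seen) == 2 and maxLocal > maxGlobal:
--                     maxGlobal = maxLocal
--             ans = max(ans, maxGlobal)
--
--     return ans
-- ===== SOURCE B (Python) =====
-- def largestVariance(s: str) -> int:
--     # one counting pass; then one pass over s updating, for each character, only the
--     # Kadane states of the ordered pairs that involve it (shared mutable state rows)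
--     counts = {}
--     for c in s:
--         counts[c] = counts.get(c, 0) + 1
--     chars = list(counts)
--     states = {}
--     for a in chars:
--         for b in chars:
--             if a != b:
--                 states[(a, b)] = [0, 0, False, False, counts[b]]
--     major_of = {}
--     for a in chars:
--         major_of[a] = [states[(a, b)] for b in chars if b != a]
--     minor_of = {}
--     for b in chars:
--         minor_of[b] = [states[(a, b)] for a in chars if a != b]
--     for c in s:
--         for st in major_of[c]:
--             cur = st[0] + 1
--             st[2] = True
--             if cur < 0 and st[4] > 0:
--                 st[0] = 0
--                 st[2] = st[3] = False
--             else: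
--                 st[0] = cur
--                 if st[3] and cur > st[1]:
--                     st[1] = cur
--         for st in minor_of[c]:
--             cur = st[0] - 1
--             remain = st[4] - 1
--             st[4] = remain
--             st[3] = True
--             if cur < 0 and remain > 0:
--                 st[0] = 0
--                 st[2] = st[3] = False
--             else:
--                 st[0] = cur
--                 if st[2] and cur > st[1]:
--                     st[1] = cur
--     ans = 0
--     for a in chars:
--         for st in major_of[a]:
--             ans = max(ans, st[1])
--     return ans
-- ===== Notes on version B (the rewrite author's own statement) =====
-- stated objective: faster
-- what changed: A rescans the whole string once per ordered pair of distinct characters (O(n*k^2)); B makes one counting pass and then a single pass over the string, updating a dict of per-pair Kadane states (two boolean flags instead of a seen-set) only for the 2(k-1) pairs involving the current character, O(n*k + k^2).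
import Mathlib
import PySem

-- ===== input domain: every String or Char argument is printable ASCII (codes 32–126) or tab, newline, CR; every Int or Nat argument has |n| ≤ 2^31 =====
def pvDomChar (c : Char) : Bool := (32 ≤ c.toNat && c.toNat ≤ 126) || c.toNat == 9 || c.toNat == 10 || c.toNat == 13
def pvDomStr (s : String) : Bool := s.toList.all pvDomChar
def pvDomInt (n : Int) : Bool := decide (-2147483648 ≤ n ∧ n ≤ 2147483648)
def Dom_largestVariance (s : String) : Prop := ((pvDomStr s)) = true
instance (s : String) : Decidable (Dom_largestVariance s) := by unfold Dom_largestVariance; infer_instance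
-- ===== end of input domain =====

-- B replaces A's per-pair rescans of the whole string by one pass over the string that
-- updates the Kadane state of every ordered pair involving the current character
-- (objective: faster — O(n·k + k²) instead of O(n·k²) for k distinct characters).

-- ===== PORT A =====
-- the two trailing checks of A's inner loop body (reset, then best update)
def pvACheck (maxLocal maxGlobal : Int) (seen : PySem.Set Char) (remain : Int) :
    Int × Int × PySem.Set Char × Int :=
  let r : Int × PySem.Set Char :=
    if maxLocal < 0 ∧ remain > 0 then (0, PySem.Set.empty) else (maxLocal, seen)
  let maxGlobal := if PySem.Set.len r.2 = 2 ∧ r.1 > maxGlobal then r.1 else maxGlobal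
  (r.1, maxGlobal, r.2, remain)

-- one iteration of A's inner 'for _ in s' loop; state (maxLocal, maxGlobal, seen, remainMinor)
def pvAStep (major minor : Char) (st : Int × Int × PySem.Set Char × Int) (c : Char) :
    Int × Int × PySem.Set Char × Int :=
  if c = major then pvACheck (st.1 + 1) st.2.1 (PySem.Set.add st.2.2.1 c) st.2.2.2
  else if c = minor then pvACheck (st.1 - 1) st.2.1 (PySem.Set.add st.2.2.1 c) (st.2.2.2 - 1)
  else st

def largestVariance (s : String) : Int :=
  let cs := s.toList
  -- first loop: allElements (set, 'add if not in' = Set.add) and the counter d together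
  let p := cs.foldl
      (fun (st : PySem.Set Char × PySem.Dict Char Int) c =>
        (PySem.Set.add st.1 c, st.2.insert c (st.2.getD c 0 + 1)))
      (PySem.Set.empty, PySem.Dict.empty)
  let allElements : List Char := p.1
  let d := p.2
  (PySem.List.pyRange 0 (PySem.List.len allElements) 1).foldl (fun ans i =>
    let major := PySem.List.pyGetD allElements i ' '
    (PySem.List.pyRange 0 (PySem.List.len allElements) 1).foldl (fun ans j =>
      if j = i then ans
      else
        let minor := PySem.List.pyGetD allElements j ' '
        let st := cs.foldl (pvAStep major minor) (0, 0, PySem.Set.empty, d.getD minor 0)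
        max ans st.2.1) ans) 0

-- ===== PORT B =====
-- the two trailing checks of B's _step (reset, then best update)
def pvBCheck (cur best : Int) (hasA hasB : Bool) (remain : Int) :
    Int × Int × Bool × Bool × Int :=
  let r : Int × Bool × Bool :=
    if cur < 0 ∧ remain > 0 then (0, false, false) else (cur, hasA, hasB)
  let best := if r.2.1 ∧ r.2.2 ∧ r.1 > best then r.1 else best
  (r.1, best, r.2.1, r.2.2, remain)

-- Source B's _step on the state (cur, best, hasA, hasB, remain)
def pvBStep (st : Int × Int × Bool × Bool × Int) (isMajor : Bool) :
    Int × Int × Bool × Bool × Int :=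
  if isMajor then pvBCheck (st.1 + 1) st.2.1 true st.2.2.2.1 st.2.2.2.2
  else pvBCheck (st.1 - 1) st.2.1 st.2.2.1 true (st.2.2.2.2 - 1)

-- default used with Dict.modify/getD; in Source B every key read is always present
def pvBDf : Int × Int × Bool × Bool × Int := (0, 0, false, false, 0)

def largestVariance_alt (s : String) : Int :=
  let cs := s.toList
  let counts := cs.foldl
      (fun (d : PySem.Dict Char Int) c => d.insert c (d.getD c 0 + 1)) PySem.Dict.empty
  let chars := counts.keys
  let states0 : PySem.Dict (Char × Char) (Int × Int × Bool × Bool × Int) :=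
    chars.foldl (fun st a => chars.foldl (fun st b =>
      if a ≠ b then st.insert (a, b) (0, 0, false, false, counts.getD b 0) else st) st)
      PySem.Dict.empty
  -- Source B's state rows are shared mutable lists; the port keeps the rows in `states`
  -- and, per character, the KEYS of the rows its adjacency lists alias
  let majorOf : PySem.Dict Char (List (Char × Char)) :=
    chars.foldl (fun d a =>
      d.insert a ((chars.filter (fun b => b ≠ a)).map (fun b => (a, b)))) PySem.Dict.empty
  let minorOf : PySem.Dict Char (List (Char × Char)) :=
    chars.foldl (fun d b =>
      d.insert b ((chars.filter (fun a => a ≠ b)).map (fun a => (a, b)))) PySem.Dict.empty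
  let states := cs.foldl (fun st c =>
    let st := (majorOf.getD c []).foldl (fun st k => st.modify k pvBDf (pvBStep · true)) st
    (minorOf.getD c []).foldl (fun st k => st.modify k pvBDf (pvBStep · false)) st) states0
  chars.foldl (fun ans a => (majorOf.getD a []).foldl
    (fun ans k => max ans ((states.getD k pvBDf).2.1)) ans) 0

-- ===== PRECONDITION & SPEC =====
def Spec_largestVariance (s : String) (out : Int) : Prop := out = largestVariance_alt s
instance (s : String) (out : Int) : Decidable (Spec_largestVariance s out) := by unfold Spec_largestVariance; infer_instance

-- ===== CLAIM (what is proved, stated in full; the proofs are below) =====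
def Claim_equal_largestVariance : Prop := ∀ (s : String), Dom_largestVariance s → Spec_largestVariance s (largestVariance s)

-- ===== LEMMAS AND PROOFS =====

-- A's inner loop skips characters other than major/minor, so it is a fold over the filtered list
theorem pvAStep_skip (a b c : Char) (st : Int × Int × PySem.Set Char × Int)
    (h1 : ¬ c = a) (h2 : ¬ c = b) : pvAStep a b st c = st := by
  simp [pvAStep, h1, h2]

theorem pvAFold_filter (a b : Char) (cs : List Char) (st : Int × Int × PySem.Set Char × Int) :
    cs.foldl (pvAStep a b) st
      = (cs.filter (fun c => c == a || c == b)).foldl (pvAStep a b) st := by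
  induction cs generalizing st with
  | nil => rfl
  | cons c t ih =>
    by_cases h1 : c = a
    · simp [List.filter_cons, h1, List.foldl_cons, ih]
    · by_cases h2 : c = b
      · simp [List.filter_cons, h1, h2, List.foldl_cons, ih]
      · simp [List.filter_cons, h1, h2, List.foldl_cons, ih, pvAStep_skip a b c st h1 h2]

-- simulation relation between A's inner state and B's pair state
def pvRel (a b : Char) (sa : Int × Int × PySem.Set Char × Int)
    (sb : Int × Int × Bool × Bool × Int) : Prop :=
  sa.1 = sb.1 ∧ sa.2.1 = sb.2.1 ∧ sa.2.2.2 = sb.2.2.2.2 ∧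
  PySem.Set.len sa.2.2.1 = (cond sb.2.2.1 1 0) + (cond sb.2.2.2.1 1 0) ∧
  (a ∈ sa.2.2.1 ↔ sb.2.2.1 = true) ∧ (b ∈ sa.2.2.1 ↔ sb.2.2.2.1 = true)

-- the two trailing checks preserve the simulation relation
theorem pvRel_check (a b : Char) (cur best : Int) (seen : PySem.Set Char) (hA hB : Bool)
    (remain : Int)
    (h4 : PySem.Set.len seen = (cond hA 1 0) + (cond hB 1 0))
    (h5 : a ∈ seen ↔ hA = true) (h6 : b ∈ seen ↔ hB = true) :
    pvRel a b (pvACheck cur best seen remain) (pvBCheck cur best hA hB remain) := by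
  unfold pvRel
  simp only [pvACheck, pvBCheck]
  by_cases hres : cur < 0 ∧ remain > 0
  · rw [if_pos hres, if_pos hres]
    dsimp only
    refine ⟨by trivial, ?_, by trivial, by simp [PySem.Set.len, PySem.Set.empty],
      by simp [PySem.Set.empty], by simp [PySem.Set.empty]⟩
    rw [if_neg (by simp [PySem.Set.len, PySem.Set.empty]), if_neg (by simp)]
  · rw [if_neg hres, if_neg hres]
    dsimp only
    have hlen2 : (PySem.Set.len seen = 2) ↔ (hA = true ∧ hB = true) := by
      cases hA <;> cases hB <;> simp [PySem.Set.len] at h4 <;>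
        simp [PySem.Set.len, h4] <;> try omega
    have hiff : (PySem.Set.len seen = 2 ∧ cur > best)
        ↔ (hA = true ∧ hB = true ∧ cur > best) := by
      constructor
      · rintro ⟨x, y⟩
        exact ⟨(hlen2.mp x).1, (hlen2.mp x).2, y⟩
      · rintro ⟨x, y, z⟩
        exact ⟨hlen2.mpr ⟨x, y⟩, z⟩
    rw [if_congr hiff rfl rfl]
    exact ⟨by trivial, by trivial, by trivial, h4, h5, h6⟩

theorem pvRel_step (a b : Char) (hab : a ≠ b) (sa : Int × Int × PySem.Set Char × Int)
    (sb : Int × Int × Bool × Bool × Int) (h : pvRel a b sa sb) (c : Char)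
    (hc : c = a ∨ c = b) :
    pvRel a b (pvAStep a b sa c) (pvBStep sb (c == a)) := by
  obtain ⟨m, g, seen, r⟩ := sa
  obtain ⟨m', g', hA, hB, r'⟩ := sb
  obtain ⟨e1, e2, e3, e4, e5, e6⟩ := h
  simp only at e1 e2 e3 e4 e5 e6
  subst e1 e2 e3
  rcases hc with rfl | rfl
  · have hca : (c == c) = true := by simp
    simp only [pvAStep, pvBStep, if_pos rfl, hca, if_true]
    apply pvRel_check
    · by_cases hmem : c ∈ seen
      · rw [PySem.Set.add_of_mem hmem, e4, (e5.mp hmem)]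
      · rw [PySem.Set.add_of_not_mem hmem]
        have hAf : hA = false := by
          cases hA with
          | false => rfl
          | true => exact absurd (e5.mpr rfl) hmem
        subst hAf
        simp only [PySem.Set.len] at e4 ⊢
        try simp [e4]
        try omega
    · simp [PySem.Set.mem_add]
    · rw [PySem.Set.mem_add]
      simp only [e6]
      have : ¬ b = c := Ne.symm hab
      simp [this]
  · have hcb : (c == a) = false := by
      simp only [beq_eq_false_iff_ne]
      exact Ne.symm hab
    simp only [pvAStep, pvBStep, if_neg (Ne.symm hab), if_pos rfl, hcb,
      Bool.false_eq_true, if_false]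
    apply pvRel_check
    · by_cases hmem : c ∈ seen
      · rw [PySem.Set.add_of_mem hmem, e4, (e6.mp hmem)]
      · rw [PySem.Set.add_of_not_mem hmem]
        have hBf : hB = false := by
          cases hB with
          | false => rfl
          | true => exact absurd (e6.mpr rfl) hmem
        subst hBf
        simp only [PySem.Set.len] at e4 ⊢
        try simp [e4]
        try omega
    · rw [PySem.Set.mem_add]
      simp only [e5]
      simp [hab]
    · simp [PySem.Set.mem_add]

theorem pvRel_fold (a b : Char) (hab : a ≠ b) (l : List Char)
    (hl : ∀ c ∈ l, c = a ∨ c = b)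
    (sa : Int × Int × PySem.Set Char × Int) (sb : Int × Int × Bool × Bool × Int)
    (h : pvRel a b sa sb) :
    pvRel a b (l.foldl (pvAStep a b) sa) (l.foldl (fun v c => pvBStep v (c == a)) sb) := by
  induction l generalizing sa sb with
  | nil => exact h
  | cons c t ih =>
    exact ih (fun x hx => hl x (List.mem_cons_of_mem _ hx)) _ _
      (pvRel_step a b hab sa sb h c (hl c (List.mem_cons_self)))

-- B's initial states dict, read at key (a, b)
set_option maxRecDepth 8192 in
theorem pvInit_inner (a b a' : Char) (hab : a ≠ b) (d : PySem.Dict Char Int)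
    (l : List Char) (st : PySem.Dict (Char × Char) (Int × Int × Bool × Bool × Int)) :
    (l.foldl (fun st b' =>
        if a' ≠ b' then st.insert (a', b') (0, 0, false, false, d.getD b' 0) else st) st).getD
        (a, b) pvBDf
      = if a' = a ∧ b ∈ l then (0, 0, false, false, d.getD b 0) else st.getD (a, b) pvBDf := by
  induction l generalizing st with
  | nil => simp
  | cons x t ih =>
    simp only [List.foldl_cons, ih]
    by_cases hx : a' = x <;> by_cases ha' : a' = a <;> by_cases hbx : b = x <;>
      by_cases hbt : b ∈ t <;>
        simp_all [PySem.Dict.getD_insert, Prod.ext_iff] <;> try (intro h; subst h; simp_all)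

set_option maxRecDepth 8192 in
theorem pvInit_outer (a b : Char) (hab : a ≠ b) (d : PySem.Dict Char Int)
    (l₂ : List Char) (hb : b ∈ l₂) (l₁ : List Char)
    (st : PySem.Dict (Char × Char) (Int × Int × Bool × Bool × Int)) :
    (l₁.foldl (fun st a' => l₂.foldl (fun st b' =>
        if a' ≠ b' then st.insert (a', b') (0, 0, false, false, d.getD b' 0) else st) st)
        st).getD (a, b) pvBDf
      = if a ∈ l₁ then (0, 0, false, false, d.getD b 0) else st.getD (a, b) pvBDf := by
  induction l₁ generalizing st with
  | nil => simp
  | cons a' t ih =>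
    simp only [List.foldl_cons, ih]
    rw [pvInit_inner a b a' hab d l₂ st]
    by_cases ha' : a' = a <;> by_cases hat : a ∈ t <;> simp_all [hb] <;> try simp_all [eq_comm]

-- a fold of inserts keyed by the loop variable, read back at one key
theorem pvAdj_getD (f : Char → List (Char × Char)) (c : Char) (l : List Char)
    (d : PySem.Dict Char (List (Char × Char))) :
    (l.foldl (fun d a => d.insert a (f a)) d).getD c []
      = if c ∈ l then f c else d.getD c [] := by
  induction l generalizing d with
  | nil => simp
  | cons a t ih =>
    simp only [List.foldl_cons, ih]
    by_cases hca : c = a <;> by_cases hct : c ∈ t <;>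
      simp_all [PySem.Dict.getD_insert]

-- a fold of modifies over a Nodup key list, read back at one key
theorem pvModFold (L : List (Char × Char)) (hL : L.Nodup) (k : Char × Char)
    (f : (Int × Int × Bool × Bool × Int) → (Int × Int × Bool × Bool × Int))
    (st : PySem.Dict (Char × Char) (Int × Int × Bool × Bool × Int)) :
    (L.foldl (fun st k' => st.modify k' pvBDf f) st).getD k pvBDf
      = if k ∈ L then f (st.getD k pvBDf) else st.getD k pvBDf := by
  induction L generalizing st with
  | nil => simp
  | cons k' t ih =>
    obtain ⟨hk't, hndt⟩ := List.nodup_cons.mp hL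
    simp only [List.foldl_cons, ih hndt]
    by_cases hkk : k = k' <;> by_cases hkt : k ∈ t <;>
      simp_all [PySem.Dict.getD_modify]

-- effect on key (a, b) of B's per-character update (major rows, then minor rows)
theorem pvUpd_char (a b : Char) (hab : a ≠ b) (c : Char) (l : List Char) (hnd : l.Nodup)
    (st : PySem.Dict (Char × Char) (Int × Int × Bool × Bool × Int)) :
    (((l.filter (fun x => x ≠ c)).map (fun x => (x, c))).foldl
        (fun st k => st.modify k pvBDf (pvBStep · false))
        (((l.filter (fun x => x ≠ c)).map (fun x => (c, x))).foldl
          (fun st k => st.modify k pvBDf (pvBStep · true)) st)).getD (a, b) pvBDf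
      = if c = a ∧ b ∈ l then pvBStep (st.getD (a, b) pvBDf) true
        else if c = b ∧ a ∈ l then pvBStep (st.getD (a, b) pvBDf) false
        else st.getD (a, b) pvBDf := by
  have hndM : ((l.filter (fun x => x ≠ c)).map (fun x => ((c, x) : Char × Char))).Nodup :=
    List.Nodup.map (fun x y h => congrArg Prod.snd h) (List.Nodup.filter _ hnd)
  have hndN : ((l.filter (fun x => x ≠ c)).map (fun x => ((x, c) : Char × Char))).Nodup :=
    List.Nodup.map (fun x y h => congrArg Prod.fst h) (List.Nodup.filter _ hnd)
  rw [pvModFold _ hndN, pvModFold _ hndM]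
  have hmemM : ((a, b) ∈ (l.filter (fun x => x ≠ c)).map (fun x => ((c, x) : Char × Char)))
      ↔ (c = a ∧ b ∈ l) := by
    simp only [List.mem_map, List.mem_filter, Prod.mk.injEq]
    constructor
    · rintro ⟨x, ⟨hx, -⟩, hc, hxb⟩
      exact ⟨hc, hxb ▸ hx⟩
    · rintro ⟨hca, hbl⟩
      refine ⟨b, ⟨hbl, ?_⟩, hca, rfl⟩
      simpa using fun (h : b = c) => hab (h.trans hca).symm
  have hmemN : ((a, b) ∈ (l.filter (fun x => x ≠ c)).map (fun x => ((x, c) : Char × Char)))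
      ↔ (c = b ∧ a ∈ l) := by
    simp only [List.mem_map, List.mem_filter, Prod.mk.injEq]
    constructor
    · rintro ⟨x, ⟨hx, -⟩, hxa, hc⟩
      exact ⟨hc, hxa ▸ hx⟩
    · rintro ⟨hcb, hal⟩
      refine ⟨a, ⟨hal, ?_⟩, rfl, hcb⟩
      simpa using fun (h : a = c) => hab (h.trans hcb)
  rw [if_congr hmemN rfl rfl, if_congr hmemM rfl rfl]
  by_cases hca : c = a ∧ b ∈ l
  · have hnotb : ¬ (c = b ∧ a ∈ l) := by
      rintro ⟨hcb, -⟩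
      exact hab (hca.1.symm.trans hcb)
    rw [if_pos hca, if_neg hnotb, if_pos hca]
  · rw [if_neg hca]
    by_cases hcb : c = b ∧ a ∈ l
    · rw [if_pos hcb, if_neg hca]
    · rw [if_neg hcb, if_neg hca]

-- the whole update pass: key (a, b) sees exactly the filtered string, as a Kadane fold
theorem pvUpd_pass (a b : Char) (hab : a ≠ b) (l : List Char) (hnd : l.Nodup)
    (ha : a ∈ l) (hb : b ∈ l)
    (majorOf minorOf : PySem.Dict Char (List (Char × Char)))
    (hM : ∀ c, majorOf.getD c []
      = if c ∈ l then (l.filter (fun x => x ≠ c)).map (fun x => (c, x)) else [])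
    (hN : ∀ c, minorOf.getD c []
      = if c ∈ l then (l.filter (fun x => x ≠ c)).map (fun x => (x, c)) else [])
    (cs : List Char) (hcs : ∀ c ∈ cs, c ∈ l)
    (st : PySem.Dict (Char × Char) (Int × Int × Bool × Bool × Int)) :
    (cs.foldl (fun st c =>
        (minorOf.getD c []).foldl (fun st k => st.modify k pvBDf (pvBStep · false))
          ((majorOf.getD c []).foldl (fun st k => st.modify k pvBDf (pvBStep · true)) st))
        st).getD (a, b) pvBDf
      = (cs.filter (fun c => c == a || c == b)).foldl (fun v c => pvBStep v (c == a))
          (st.getD (a, b) pvBDf) := by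
  induction cs generalizing st with
  | nil => simp
  | cons c t ih =>
    simp only [List.foldl_cons, ih (fun x hx => hcs x (List.mem_cons_of_mem _ hx))]
    rw [hM c, hN c, if_pos (hcs c List.mem_cons_self), if_pos (hcs c List.mem_cons_self)]
    rw [pvUpd_char a b hab c l hnd st]
    by_cases hca : c = a <;> by_cases hcb : c = b <;>
      simp_all [List.filter_cons, ha, hb] <;>
        try (first
          | rw [show (c == a) = false from beq_eq_false_iff_ne.mpr (fun h => hab h.symm)]
          | rw [show (b == a) = false from beq_eq_false_iff_ne.mpr (fun h => hab h.symm)])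

-- index double loop over a Nodup list = element double loop
theorem pvIdx_loops (L : List Char) (hnd : L.Nodup) (g : Char → Char → Int → Int) :
    (PySem.List.pyRange 0 (PySem.List.len L) 1).foldl (fun ans i =>
        (PySem.List.pyRange 0 (PySem.List.len L) 1).foldl (fun ans j =>
          if j = i then ans
          else g (PySem.List.pyGetD L i ' ') (PySem.List.pyGetD L j ' ') ans) ans) 0
      = L.foldl (fun ans a => L.foldl (fun ans b =>
          if b = a then ans else g a b ans) ans) 0 := by
  have hstep : ∀ (F : Int → Int → Char → Int) (init : Int),
      (PySem.List.pyRange 0 (PySem.List.len L) 1).foldl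
          (fun ans i => F ans i (PySem.List.pyGetD L i ' ')) init
        = (PySem.List.enumerate L).foldl (fun ans p => F ans p.1 p.2) init := by
    intro F init
    rw [PySem.List.enumerate_eq_map_pyRange L ' ', List.foldl_map]
  have hmem : ∀ p ∈ PySem.List.enumerate L 0, ∀ q ∈ PySem.List.enumerate L 0,
      (p.1 = q.1 ↔ p.2 = q.2) := by
    intro p hp q hq
    rw [PySem.List.mem_enumerate_iff] at hp hq
    obtain ⟨k, hk, rfl⟩ := hp
    obtain ⟨m, hm, rfl⟩ := hq
    simp only [zero_add]
    constructor
    · intro h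
      have : k = m := by exact_mod_cast h
      subst this; rfl
    · intro h
      have : k = m := (List.Nodup.getElem_inj_iff hnd).mp h
      subst this; rfl
  rw [hstep (fun ans i mj => (PySem.List.pyRange 0 (PySem.List.len L) 1).foldl
      (fun ans j => if j = i then ans else g mj (PySem.List.pyGetD L j ' ') ans) ans)]
  have hinner : ∀ (q : Int × Char) (ans : Int),
      (PySem.List.pyRange 0 (PySem.List.len L) 1).foldl
          (fun ans j => if j = q.1 then ans else g q.2 (PySem.List.pyGetD L j ' ') ans) ans
        = (PySem.List.enumerate L).foldl
            (fun ans p => if p.1 = q.1 then ans else g q.2 p.2 ans) ans := by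
    intro q ans
    exact hstep (fun ans j mn => if j = q.1 then ans else g q.2 mn ans) ans
  have h2 : (PySem.List.enumerate L).foldl (fun ans q =>
        (PySem.List.enumerate L).foldl
          (fun ans p => if p.1 = q.1 then ans else g q.2 p.2 ans) ans) 0
      = (PySem.List.enumerate L).foldl (fun ans q =>
        (PySem.List.enumerate L).foldl
          (fun ans p => if p.2 = q.2 then ans else g q.2 p.2 ans) ans) 0 := by
    apply PySem.List.foldl_congr_mem
    intro ans q hq
    apply PySem.List.foldl_congr_mem
    intro ans p hp
    rw [if_congr (hmem p hp q hq) rfl rfl]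
  have h3 : (PySem.List.enumerate L).foldl (fun ans q =>
        (PySem.List.enumerate L).foldl
          (fun ans p => if p.2 = q.2 then ans else g q.2 p.2 ans) ans) 0
      = L.foldl (fun ans a => L.foldl (fun ans b =>
          if b = a then ans else g a b ans) ans) 0 := by
    conv_rhs => rw [← PySem.List.map_snd_enumerate L 0, List.foldl_map]
    apply PySem.List.foldl_congr_mem
    intro ans q _
    rw [List.foldl_map]
  calc _ = _ := by
        apply PySem.List.foldl_congr_mem
        intro ans q _
        exact hinner q ans
    _ = _ := h2
    _ = _ := h3

-- A rewritten as a double element loop over the distinct characters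
theorem pvA_eq (s : String) :
    largestVariance s
      = (PySem.Set.ofList s.toList).foldl (fun ans a =>
          (PySem.Set.ofList s.toList).foldl (fun ans b =>
            if b = a then ans
            else max ans ((s.toList.foldl (pvAStep a b)
              (0, 0, PySem.Set.empty,
                (s.toList.foldl (fun (d : PySem.Dict Char Int) c =>
                  d.insert c (d.getD c 0 + 1)) PySem.Dict.empty).getD b 0)).2.1)) ans) 0 := by
  simp only [largestVariance]
  rw [PySem.List.foldl_prod_mk (f := PySem.Set.add)
      (g := fun (d : PySem.Dict Char Int) c => d.insert c (d.getD c 0 + 1))]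
  have hofl : List.foldl PySem.Set.add PySem.Set.empty s.toList
      = PySem.Set.ofList s.toList := (PySem.Set.ofList_eq_foldl s.toList).symm
  rw [hofl]
  dsimp only
  exact pvIdx_loops (PySem.Set.ofList s.toList) (PySem.Set.nodup_ofList s.toList)
    (fun mj mn ans => max ans ((List.foldl (pvAStep mj mn)
      (0, 0, PySem.Set.empty,
        (List.foldl (fun (d : PySem.Dict Char Int) c => d.insert c (d.getD c 0 + 1))
          PySem.Dict.empty s.toList).getD mn 0) s.toList).2.1))

-- B rewritten as the same double element loop, with the per-pair Kadane fold over the filtered string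
theorem pvB_eq (s : String) :
    largestVariance_alt s
      = (PySem.Set.ofList s.toList).foldl (fun ans a =>
          (PySem.Set.ofList s.toList).foldl (fun ans b =>
            if b ≠ a then
              max ans (((s.toList.filter (fun c => c == a || c == b)).foldl
                (fun v c => pvBStep v (c == a))
                (0, 0, false, false,
                  (s.toList.foldl (fun (d : PySem.Dict Char Int) c =>
                    d.insert c (d.getD c 0 + 1)) PySem.Dict.empty).getD b 0)).2.1)
            else ans) ans) 0 := by
  simp only [largestVariance_alt]
  have hkeys : (s.toList.foldl (fun (d : PySem.Dict Char Int) c =>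
      d.insert c (d.getD c 0 + 1)) PySem.Dict.empty).keys = PySem.Set.ofList s.toList := by
    rw [PySem.Dict.keys_foldl_insert]
    exact PySem.Set.update_nil_left s.toList
  rw [hkeys]
  have hM : ∀ c, ((PySem.Set.ofList s.toList).foldl (fun d a =>
        d.insert a (((PySem.Set.ofList s.toList).filter (fun b => b ≠ a)).map (fun b => (a, b))))
        PySem.Dict.empty).getD c []
      = if c ∈ PySem.Set.ofList s.toList then
          ((PySem.Set.ofList s.toList).filter (fun x => x ≠ c)).map (fun x => (c, x)) else [] := by
    intro c
    rw [pvAdj_getD]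
    by_cases hc : c ∈ PySem.Set.ofList s.toList <;> simp [hc]
  have hN : ∀ c, ((PySem.Set.ofList s.toList).foldl (fun d b =>
        d.insert b (((PySem.Set.ofList s.toList).filter (fun a => a ≠ b)).map (fun a => (a, b))))
        PySem.Dict.empty).getD c []
      = if c ∈ PySem.Set.ofList s.toList then
          ((PySem.Set.ofList s.toList).filter (fun x => x ≠ c)).map (fun x => (x, c)) else [] := by
    intro c
    rw [pvAdj_getD]
    by_cases hc : c ∈ PySem.Set.ofList s.toList <;> simp [hc]
  apply PySem.List.foldl_congr_mem
  intro ans a ha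
  rw [hM a, if_pos ha, List.foldl_map, List.foldl_filter]
  apply PySem.List.foldl_congr_mem
  intro ans' b hb
  by_cases hba : b = a
  · simp [hba]
  · rw [if_pos (by simpa using hba), if_pos (by simpa using hba)]
    have hab : a ≠ b := fun h => hba h.symm
    rw [pvUpd_pass a b hab (PySem.Set.ofList s.toList) (PySem.Set.nodup_ofList s.toList)
      ha hb _ _ hM hN s.toList
      (fun c hc => (PySem.Set.mem_ofList _ _).mpr hc) _]
    rw [pvInit_outer a b hab _ (PySem.Set.ofList s.toList) hb (PySem.Set.ofList s.toList)
      PySem.Dict.empty]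
    rw [if_pos ha]

-- ===== VERDICT (by name: the statement is the Claim_ definition above) =====
theorem largestVariance_spec : Claim_equal_largestVariance := by
  intro s _
  unfold Spec_largestVariance
  rw [pvA_eq, pvB_eq]
  apply PySem.List.foldl_congr_mem
  intro ans a ha
  apply PySem.List.foldl_congr_mem
  intro ans' b hb
  by_cases hab : b = a
  · simp [hab]
  · have hab' : a ≠ b := fun h => hab h.symm
    rw [if_neg hab, if_pos hab]
    rw [pvAFold_filter a b s.toList]
    have hmemf : ∀ c ∈ s.toList.filter (fun c => c == a || c == b), c = a ∨ c = b := by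
      intro c hc
      have := (List.mem_filter.mp hc).2
      simpa using this
    have hrel := pvRel_fold a b hab' (s.toList.filter (fun c => c == a || c == b)) hmemf
      (0, 0, PySem.Set.empty,
        (s.toList.foldl (fun (d : PySem.Dict Char Int) c =>
          d.insert c (d.getD c 0 + 1)) PySem.Dict.empty).getD b 0)
      (0, 0, false, false,
        (s.toList.foldl (fun (d : PySem.Dict Char Int) c =>
          d.insert c (d.getD c 0 + 1)) PySem.Dict.empty).getD b 0)
      ⟨rfl, rfl, rfl, by simp [PySem.Set.len, PySem.Set.empty],
        by simp [PySem.Set.empty], by simp [PySem.Set.empty]⟩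
    rw [hrel.2.1]
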